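-- pv_equiv track=rewrite | github.com/mayanbhadage/LeetCode | 1351.CountNegativeNumbersInSortedMatrix/count_negative_binarysearch.py | rightBiasBSearch
-- ===== SOURCE A (Python) =====
-- def rightBiasBSearch(nums, target):
--     left = 0
--     right = len(nums) - 1
--
--     while(left <= right):
--         mid = left + (right-left)//2
--
--         if nums[mid] > target:
--             left = mid + 1
--         elif nums[mid] < target:
--             right = mid - 1
--         else:
--             left = mid + 1
--
--     return left
-- ===== SOURCE B (Python) =====
-- def rightBiasBSearch(nums, target):
--     def go(sub, base):
--         if not sub:
--             return base
--         off = (len(sub) - 1) // 2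
--         if sub[off] < target:
--             return go(sub[:off], base)
--         return go(sub[off + 1:], base + off + 1)
--     return go(nums, 0)
-- ===== Notes on version B (the rewrite author's own statement) =====
-- stated objective: alternative
-- what changed: The index-pair while-loop is replaced by a divide-and-conquer recursion on list slices: go(sub, base) picks the middle element of the current sublist and recurses on the left slice or (with base shifted) the right slice, so no left/right indices are maintained at all.
import Mathlib
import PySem

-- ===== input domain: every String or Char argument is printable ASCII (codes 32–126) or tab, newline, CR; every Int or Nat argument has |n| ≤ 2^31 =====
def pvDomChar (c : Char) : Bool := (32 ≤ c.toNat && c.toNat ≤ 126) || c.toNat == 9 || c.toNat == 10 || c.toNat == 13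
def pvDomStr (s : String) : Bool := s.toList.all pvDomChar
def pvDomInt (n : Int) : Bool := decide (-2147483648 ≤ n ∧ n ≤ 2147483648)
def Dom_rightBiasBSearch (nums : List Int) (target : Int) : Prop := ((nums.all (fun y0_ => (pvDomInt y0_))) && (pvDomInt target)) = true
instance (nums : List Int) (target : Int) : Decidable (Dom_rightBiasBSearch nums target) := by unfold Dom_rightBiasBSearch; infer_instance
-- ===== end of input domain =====

-- B: the index-pair while-loop is replaced by divide-and-conquer recursion on list slices with an offset accumulator (alternative decomposition; slicing costs more, not faster).


-- ===== PORT A =====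
-- literal port of A's while-loop: state (left,right); fuel = nums.length+1 bounds the
-- iteration count (the interval [left,right] shrinks each pass), so fuel 0 is never
-- reached; nums[mid] is provably in range, so the getD 0 default is never used
def pvLoopA (nums : List Int) (target : Int) : Nat → Int → Int → Int
  | 0, left, _ => left
  | fuel + 1, left, right =>
    if left ≤ right then
      let mid := left + PySem.Int.floordiv (right - left) 2
      if (PySem.List.pyGet? nums mid).getD 0 > target then
        pvLoopA nums target fuel (mid + 1) right
      else if (PySem.List.pyGet? nums mid).getD 0 < target then
        pvLoopA nums target fuel left (mid - 1)
      else
        pvLoopA nums target fuel (mid + 1) right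
    else left

def rightBiasBSearch (nums : List Int) (target : Int) : Int :=
  pvLoopA nums target (nums.length + 1) 0 (nums.length - 1)

-- ===== PORT B =====
-- port of B: go(sub, base); off = (len(sub)-1)//2 is a Nat in [0, len-1], so Python's
-- sub[off], sub[:off], sub[off+1:] are exactly List.take/drop/getElem here (all in range;
-- the getD 0 default of pyGet? is never used)
def pvGo (target : Int) (sub : List Int) (base : Int) : Int :=
  if sub = [] then base
  else
    let off := (sub.length - 1) / 2
    if (PySem.List.pyGet? sub (off : Int)).getD 0 < target then
      pvGo target (sub.take off) base
    else
      pvGo target (sub.drop (off + 1)) (base + (off : Int) + 1)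
  termination_by sub.length
  decreasing_by
    · rename_i h _; simp only [List.length_take]
      cases sub with
      | nil => exact absurd rfl h
      | cons x xs => simp; omega
    · rename_i h _; simp only [List.length_drop]
      cases sub with
      | nil => exact absurd rfl h
      | cons x xs => simp

def rightBiasBSearch_alt (nums : List Int) (target : Int) : Int :=
  pvGo target nums 0

-- ===== PRECONDITION & SPEC =====
def Spec_rightBiasBSearch (nums : List Int) (target : Int) (out : Int) : Prop := out = rightBiasBSearch_alt nums target
instance (nums : List Int) (target : Int) (out : Int) : Decidable (Spec_rightBiasBSearch nums target out) := by unfold Spec_rightBiasBSearch; infer_instance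

-- ===== CLAIM (what is proved, stated in full; the proofs are below) =====
def Claim_equal_rightBiasBSearch : Prop := ∀ (nums : List Int) (target : Int), Dom_rightBiasBSearch nums target → Spec_rightBiasBSearch nums target (rightBiasBSearch nums target)

-- ===== LEMMAS AND PROOFS =====
theorem loop_eq_go (nums : List Int) (target : Int) :
    ∀ (fuel : Nat) (l r : Int), 0 ≤ l → r < nums.length → (r - l + 1).toNat ≤ fuel →
      pvLoopA nums target fuel l r =
        pvGo target ((nums.drop l.toNat).take (r - l + 1).toNat) l := by
  intro fuel
  induction fuel with
  | zero =>
    intro l r hl hr hf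
    have h0 : (r - l + 1).toNat = 0 := by omega
    rw [h0]
    simp only [List.take_zero]
    rw [pvGo]
    simp [pvLoopA]
  | succ n ih =>
    intro l r hl hr hf
    rw [pvLoopA]
    by_cases hlr : l ≤ r
    · rw [if_pos hlr]
      have hfd : PySem.Int.floordiv (r - l) 2 = (r - l) / 2 :=
        PySem.Int.floordiv_eq_ediv_of_pos (by omega)
      rw [hfd]
      set N := (r - l + 1).toNat with hN
      set L := l.toNat with hL
      set off := (N - 1) / 2 with hoff
      set m := l + (r - l) / 2 with hm
      have hNc : (N : Int) = r - l + 1 := by omega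
      have hLc : (L : Int) = l := by omega
      have hoffc : (off : Int) = (r - l) / 2 := by omega
      have hmoff : m.toNat = L + off := by omega
      have hmlt : m < nums.length := by omega
      have hm0 : 0 ≤ m := by omega
      set sub := (nums.drop L).take N with hsub
      have hlen : sub.length = N := by
        simp only [hsub, List.length_take, List.length_drop]
        omega
      have hne : ¬ sub = [] := by
        intro h; rw [h] at hlen; simp at hlen; omega
      have hofflt : off < N := by omega
      -- the two programs read the same element
      have hAval : (PySem.List.pyGet? nums m).getD 0 = nums[m.toNat]'(by omega) := by
        rw [PySem.List.pyGet?_eq_some_getElem nums hm0 hmlt]; rfl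
      have hBval : (PySem.List.pyGet? sub ((off : Nat) : Int)).getD 0
          = nums[m.toNat]'(by omega) := by
        rw [PySem.List.pyGet?_natCast]
        have : sub[off]? = some (sub[off]'(by omega)) := List.getElem?_eq_getElem (by omega)
        rw [this]
        simp only [Option.getD_some, hsub]
        rw [List.getElem_take, List.getElem_drop]
        congr 1
        omega
      have hstep : pvGo target sub l =
          if nums[m.toNat]'(by omega) < target then pvGo target (sub.take off) l
          else pvGo target (sub.drop (off + 1)) (l + (off : Int) + 1) := by
        rw [pvGo, if_neg hne]
        simp only [hlen, ← hoff, hBval]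
      -- the two recursion arguments coincide
      have htakeEq : (nums.drop l.toNat).take ((m - 1) - l + 1).toNat = sub.take off := by
        have e : ((m - 1) - l + 1).toNat = off := by omega
        rw [e, hsub, List.take_take, Nat.min_eq_left (by omega : off ≤ N)]
      have hdropEq : (nums.drop (m + 1).toNat).take (r - (m + 1) + 1).toNat
          = sub.drop (off + 1) := by
        have e1 : (r - (m + 1) + 1).toNat = N - (off + 1) := by omega
        have e2 : (m + 1).toNat = L + (off + 1) := by omega
        rw [hsub, List.drop_take, List.drop_drop, e1, e2]
      rw [hstep]
      by_cases hgt : (PySem.List.pyGet? nums m).getD 0 > target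
      · rw [if_pos hgt, if_neg (by omega : ¬ nums[m.toNat]'(by omega) < target)]
        rw [ih (m + 1) r (by omega) hr (by omega), hdropEq]
        congr 1
        omega
      · rw [if_neg hgt]
        by_cases hlt : (PySem.List.pyGet? nums m).getD 0 < target
        · rw [if_pos hlt, if_pos (by omega : nums[m.toNat]'(by omega) < target)]
          rw [ih l (m - 1) hl (by omega) (by omega), htakeEq]
        · rw [if_neg hlt, if_neg (by omega : ¬ nums[m.toNat]'(by omega) < target)]
          rw [ih (m + 1) r (by omega) hr (by omega), hdropEq]
          congr 1
          omega
    · rw [if_neg hlr]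
      have h0 : (r - l + 1).toNat = 0 := by omega
      rw [h0, pvGo]
      simp

-- ===== VERDICT (by name: the statement is the Claim_ definition above) =====
theorem rightBiasBSearch_spec : Claim_equal_rightBiasBSearch := by
  intro nums target _
  unfold Spec_rightBiasBSearch rightBiasBSearch rightBiasBSearch_alt
  have h := loop_eq_go nums target (nums.length + 1) 0 ((nums.length : Int) - 1)
    le_rfl (by omega) (by omega)
  simpa using h
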